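-- pv_equiv track=rewrite | github.com/jied314/IQs | tags/hash_table/valid_sudoku.py | is_valid_column
-- ===== SOURCE A (Python) =====
-- def is_valid_column(board, column_index):
--     column = [row[column_index] for row in board]
--     uniques = set()
--     for e in column:
--         if e == ".":
--             continue
--         if e in uniques:
--             return False
--         uniques.add(e)
--     return True
-- ===== SOURCE B (Python) =====
-- def is_valid_column(board, column_index):
--     column = [row[column_index] for row in board if row[column_index] != "."]
--     s = sorted(column)
--     return all(a != b for a, b in zip(s, s[1:]))
-- ===== Notes on version B (the rewrite author's own statement) =====
-- stated objective: alternative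
-- what changed: Replaces the incremental hash-set membership loop with filter-then-sort-then-adjacent-scan: collect the non-'.' cells, sort them, and check no two adjacent sorted elements are equal.
import Mathlib
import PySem

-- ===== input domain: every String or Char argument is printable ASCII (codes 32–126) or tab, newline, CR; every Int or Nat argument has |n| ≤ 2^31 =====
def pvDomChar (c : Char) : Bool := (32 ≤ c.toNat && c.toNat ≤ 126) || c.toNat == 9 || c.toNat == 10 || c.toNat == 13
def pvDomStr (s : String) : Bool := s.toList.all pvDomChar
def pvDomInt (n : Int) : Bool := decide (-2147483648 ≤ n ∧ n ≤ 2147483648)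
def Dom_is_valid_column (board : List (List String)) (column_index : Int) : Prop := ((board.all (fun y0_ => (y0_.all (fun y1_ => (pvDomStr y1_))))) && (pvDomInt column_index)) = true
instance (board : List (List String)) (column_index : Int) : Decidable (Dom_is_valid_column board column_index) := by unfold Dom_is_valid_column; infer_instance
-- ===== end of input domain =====

-- B replaces A's incremental set-membership loop by filter, sort, and an adjacent-equality scan (alternative algorithm, same results).


-- ===== PORT A =====
-- the 'for e in column' loop with early return False
def isValidColumnLoopA : List String → PySem.Set String → Bool
  | [], _ => true
  | e :: rest, uniques =>
    if e == "." then isValidColumnLoopA rest uniques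
    else if PySem.Set.contains uniques e then false
    else isValidColumnLoopA rest (PySem.Set.add uniques e)

def is_valid_column (board : List (List String)) (column_index : Int) : Bool :=
  -- row[column_index]: pyGetD is exact under Pre_ (the default is never used inside Pre_)
  let column := board.map (fun row => PySem.List.pyGetD row column_index "")
  isValidColumnLoopA column PySem.Set.empty

-- ===== PORT B =====
-- all(a != b for a, b in zip(s, s[1:]))
def noAdjEq : List String → Bool
  | a :: b :: t => a != b && noAdjEq (b :: t)
  | _ => true

def is_valid_column_alt (board : List (List String)) (column_index : Int) : Bool :=
  let column := (board.map (fun row => PySem.List.pyGetD row column_index "")).filter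
                  (fun e => e != ".")
  noAdjEq (PySem.List.sorted column (fun x => x) false)

-- ===== PRECONDITION & SPEC =====
-- Pre_ excludes exactly the inputs where Python A raises IndexError: column_index out of range for some row.
def Pre_is_valid_column (board : List (List String)) (column_index : Int) : Prop :=
  ∀ row ∈ board, PySem.Raise.InRange row.length column_index
instance (board : List (List String)) (column_index : Int) : Decidable (Pre_is_valid_column board column_index) := by unfold Pre_is_valid_column; infer_instance

def pvWitness_is_valid_column : List (List String) × Int := ([["1", "."], ["2", "1"]], 0)

def Spec_is_valid_column (board : List (List String)) (column_index : Int) (out : Bool) : Prop := out = is_valid_column_alt board column_index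
instance (board : List (List String)) (column_index : Int) (out : Bool) : Decidable (Spec_is_valid_column board column_index out) := by unfold Spec_is_valid_column; infer_instance

-- ===== CLAIM (what is proved, stated in full; the proofs are below) =====
def Claim_equal_is_valid_column : Prop := ∀ (board : List (List String)) (column_index : Int), Dom_is_valid_column board column_index → Pre_is_valid_column board column_index → Spec_is_valid_column board column_index (is_valid_column board column_index)

-- ===== LEMMAS AND PROOFS =====

-- A's loop returns true iff the non-'.' entries are distinct and disjoint from the accumulated set.
theorem loopA_iff (l : List String) (s : PySem.Set String) :
    isValidColumnLoopA l s = true ↔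
      ((l.filter (fun e => e != ".")).Nodup ∧ ∀ x ∈ l.filter (fun e => e != "."), x ∉ s) := by
  induction l generalizing s with
  | nil => simp [isValidColumnLoopA]
  | cons e rest ih =>
    by_cases hdot : e = "."
    · subst hdot
      simp [isValidColumnLoopA, ih]
    · have hne : (e != ".") = true := by simp [hdot]
      have h1 : ¬ ((e == ".") = true) := by simp [hdot]
      by_cases hmem : e ∈ s
      · have hc : PySem.Set.contains s e = true := by
          simp [PySem.Set.contains, hmem]
        simp only [isValidColumnLoopA, if_neg h1, hc, List.filter_cons, hne, if_true]
        simp only [Bool.false_eq_true, false_iff]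
        rintro ⟨-, hall⟩
        exact hall e List.mem_cons_self hmem
      · have hc : PySem.Set.contains s e = false := by
          simp [PySem.Set.contains, hmem]
        simp only [isValidColumnLoopA, if_neg h1, hc, List.filter_cons, hne, if_true,
          Bool.false_eq_true, if_false]
        rw [ih]
        simp only [List.nodup_cons, List.mem_cons]
        constructor
        · rintro ⟨hnd, hall⟩
          refine ⟨⟨fun hin => ?_, hnd⟩, ?_⟩
          · have := hall e hin
            simp [PySem.Set.mem_add] at this
          · rintro x (rfl | hx')
            · exact hmem
            · have := hall x hx'
              simp only [PySem.Set.mem_add, not_or] at this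
              exact this.1
        · rintro ⟨⟨hni, hnd⟩, hall⟩
          refine ⟨hnd, fun x hx => ?_⟩
          simp only [PySem.Set.mem_add, not_or]
          exact ⟨hall x (Or.inr hx), fun hxe => hni (hxe ▸ hx)⟩

-- For a ≤-sorted list, the adjacent-equality scan decides Nodup.
theorem noAdjEq_iff_nodup (l : List String) (h : l.Pairwise (· ≤ ·)) :
    noAdjEq l = true ↔ l.Nodup := by
  induction l with
  | nil => simp [noAdjEq]
  | cons a t ih =>
    cases t with
    | nil => simp [noAdjEq]
    | cons b u =>
      obtain ⟨h1, h2⟩ := List.pairwise_cons.mp h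
      have hrec := ih h2
      simp only [noAdjEq, Bool.and_eq_true, bne_iff_ne, hrec]
      constructor
      · rintro ⟨hab, hnd⟩
        refine List.nodup_cons.mpr ⟨?_, hnd⟩
        intro ha
        rcases List.mem_cons.mp ha with rfl | ha'
        · exact hab rfl
        · -- a ∈ u, but a ≤ b ≤ a forces a = b
          have hba : b ≤ a := (List.pairwise_cons.mp h2).1 a ha'
          have hab' : a ≤ b := h1 b (List.mem_cons_self)
          exact hab (le_antisymm hab' hba)
      · intro hnd
        have hnd' := List.nodup_cons.mp hnd
        exact ⟨fun hab => hnd'.1 (hab ▸ List.mem_cons_self), hnd'.2⟩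

-- ===== VERDICT (by name: the statement is the Claim_ definition above) =====
theorem is_valid_column_spec : Claim_equal_is_valid_column := by
  intro board column_index _ _
  unfold Spec_is_valid_column is_valid_column is_valid_column_alt
  set col := board.map (fun row => PySem.List.pyGetD row column_index "") with hcol
  set L := col.filter (fun e => e != ".") with hL
  have hA : isValidColumnLoopA col PySem.Set.empty = true ↔ L.Nodup := by
    rw [loopA_iff]
    simp [PySem.Set.empty, ← hL]
  have hperm : (PySem.List.sorted L (fun x => x) false).Perm L := PySem.List.sorted_perm L _ _
  have hB : noAdjEq (PySem.List.sorted L (fun x => x) false) = true ↔ L.Nodup := by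
    rw [noAdjEq_iff_nodup _ (PySem.List.sorted_pairwise L (fun x => x))]
    exact hperm.nodup_iff
  have := hA.trans hB.symm
  cases h1 : isValidColumnLoopA col PySem.Set.empty <;>
    cases h2 : noAdjEq (PySem.List.sorted L (fun x => x) false) <;>
      simp_all
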